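-- pv_equiv track=rewrite | github.com/RickXie747/UNSW-18S1-COMP9021- | Samples/Week 6 - Sample questions/Sample questions/sample_4.py | is_heterosquare
-- ===== SOURCE A (Python) =====
-- def is_heterosquare(square):
--     '''
--     A heterosquare of order n is an arrangement of the integers 1 to n**2 in a square,
--     such that the rows, columns, and diagonals all sum to DIFFERENT values.
--     In contrast, magic squares have all these sums equal.
--
--
--     >>> is_heterosquare([[1, 2, 3],\
--                          [8, 9, 4],\
--                          [7, 6, 5]])
--     True
--     >>> is_heterosquare([[1, 2, 3],\
--                          [9, 8, 4],\
--                          [7, 6, 5]])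
--     False
--     >>> is_heterosquare([[2, 1, 3, 4],\
--                          [5, 6, 7, 8],\
--                          [9, 10, 11, 12],\
--                          [13, 14, 15, 16]])
--     True
--     >>> is_heterosquare([[1, 2, 3, 4],\
--                          [5, 6, 7, 8],\
--                          [9, 10, 11, 12],\
--                          [13, 14, 15, 16]])
--     False
--     '''
--     n = len(square)
--     if any(len(line) != n for line in square):
--         return False
--     # Insert your code here
--     L = [0] * ( n * 2 + 2 )
--
--     for i in range(n):
--         for j in range(n):
--             L[i] += square[i][j]
--
--     for i in range(n):
--         for j in range(n):
--             L[n + i] += square[j][i]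
--
--     for i in range(n):
--         L[2 * n] += square[i][i]
--         L[2 * n + 1] += square[i][n - i - 1]
--
--     for i in range(len(L)):
--         for j in range(i + 1, len(L)):
--             if L[i] == L[j]:
--                 return False
--     return True
-- ===== SOURCE B (Python) =====
-- def is_heterosquare(square):
--     n = len(square)
--     if any(len(line) != n for line in square):
--         return False
--     sums = [sum(row) for row in square]
--     sums += [sum(square[j][i] for j in range(n)) for i in range(n)]
--     sums.append(sum(square[i][i] for i in range(n)))
--     sums.append(sum(square[i][n - i - 1] for i in range(n)))
--     return len(set(sums)) == len(sums)
-- ===== Notes on version B (the rewrite author's own statement) =====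
-- stated objective: simpler
-- what changed: Replaces the in-place accumulator array built by four index loops and the O(k^2) nested pairwise duplicate scan with comprehensions building the list of row/column/diagonal sums and a single set-cardinality distinctness test.
import Mathlib
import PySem

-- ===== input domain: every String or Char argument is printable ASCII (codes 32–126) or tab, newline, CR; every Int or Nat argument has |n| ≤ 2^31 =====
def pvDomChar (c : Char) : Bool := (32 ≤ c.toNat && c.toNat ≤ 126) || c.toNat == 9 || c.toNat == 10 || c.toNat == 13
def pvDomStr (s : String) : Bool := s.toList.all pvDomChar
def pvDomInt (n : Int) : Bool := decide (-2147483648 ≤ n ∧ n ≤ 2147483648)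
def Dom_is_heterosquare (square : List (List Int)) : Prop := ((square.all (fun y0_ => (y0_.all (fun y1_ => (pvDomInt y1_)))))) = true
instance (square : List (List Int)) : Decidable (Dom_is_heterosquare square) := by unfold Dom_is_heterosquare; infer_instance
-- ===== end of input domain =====

-- B replaces A's in-place accumulator array and nested pairwise duplicate scan by
-- comprehensions of the row/column/diagonal sums plus a set-cardinality distinctness test (simpler).

-- ===== PORT A =====
def is_heterosquare (square : List (List Int)) : Bool :=
  let n : Int := square.length
  if square.any (fun line => !((line.length : Int) == n)) then false
  else
    let L0 : List Int := List.replicate (square.length * 2 + 2) 0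
    let L1 := (PySem.List.pyRange 0 n 1).foldl (fun L i =>
      (PySem.List.pyRange 0 n 1).foldl (fun L j =>
        PySem.List.pySetD L i (PySem.List.pyGetD L i 0 +
          PySem.List.pyGetD (PySem.List.pyGetD square i []) j 0)) L) L0
    let L2 := (PySem.List.pyRange 0 n 1).foldl (fun L i =>
      (PySem.List.pyRange 0 n 1).foldl (fun L j =>
        PySem.List.pySetD L (n + i) (PySem.List.pyGetD L (n + i) 0 +
          PySem.List.pyGetD (PySem.List.pyGetD square j []) i 0)) L) L1
    let L3 := (PySem.List.pyRange 0 n 1).foldl (fun L i =>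
      let La := PySem.List.pySetD L (2 * n) (PySem.List.pyGetD L (2 * n) 0 +
          PySem.List.pyGetD (PySem.List.pyGetD square i []) i 0)
      PySem.List.pySetD La (2 * n + 1) (PySem.List.pyGetD La (2 * n + 1) 0 +
          PySem.List.pyGetD (PySem.List.pyGetD square i []) (n - i - 1) 0)) L2
    (PySem.List.pyRange 0 (L3.length : Int) 1).all (fun i =>
      (PySem.List.pyRange (i + 1) (L3.length : Int) 1).all (fun j =>
        !(PySem.List.pyGetD L3 i 0 == PySem.List.pyGetD L3 j 0)))

-- ===== PORT B =====
def is_heterosquare_alt (square : List (List Int)) : Bool :=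
  let n : Int := square.length
  if square.any (fun line => !((line.length : Int) == n)) then false
  else
    let sums := square.map (fun row => row.sum)
    let sums := sums ++ (PySem.List.pyRange 0 n 1).map (fun i =>
        ((PySem.List.pyRange 0 n 1).map (fun j =>
          PySem.List.pyGetD (PySem.List.pyGetD square j []) i 0)).sum)
    let sums := sums ++ [((PySem.List.pyRange 0 n 1).map (fun i =>
          PySem.List.pyGetD (PySem.List.pyGetD square i []) i 0)).sum]
    let sums := sums ++ [((PySem.List.pyRange 0 n 1).map (fun i =>
          PySem.List.pyGetD (PySem.List.pyGetD square i []) (n - i - 1) 0)).sum]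
    decide (PySem.Set.len (PySem.Set.ofList sums) = sums.length)

-- ===== PRECONDITION & SPEC =====
def Spec_is_heterosquare (square : List (List Int)) (out : Bool) : Prop := out = is_heterosquare_alt square
instance (square : List (List Int)) (out : Bool) : Decidable (Spec_is_heterosquare square out) := by unfold Spec_is_heterosquare; infer_instance

-- ===== CLAIM (what is proved, stated in full; the proofs are below) =====
def Claim_equal_is_heterosquare : Prop := ∀ (square : List (List Int)), Dom_is_heterosquare square → Spec_is_heterosquare square (is_heterosquare square)

-- ===== LEMMAS AND PROOFS =====

theorem pv_getD_mid (pre : List Int) (x : Int) (suf : List Int) (nn : Nat) (h : nn = pre.length) :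
    (pre ++ x :: suf).getD nn 0 = x := by
  subst h; simp [List.getD]

theorem pv_set_mid (pre : List Int) (x : Int) (suf : List Int) (v : Int) (nn : Nat) (h : nn = pre.length) :
    (pre ++ x :: suf).set nn v = pre ++ v :: suf := by
  subst h; simp

theorem pv_addMany {α : Type} (g : α → Int) (k : Nat) (xs : List α) :
    ∀ (L : List Int), k < L.length →
    xs.foldl (fun L x => L.set k (L.getD k 0 + g x)) L = L.set k (L.getD k 0 + (xs.map g).sum) := by
  induction xs with
  | nil =>
    intro L h
    simp only [List.foldl_nil, List.map_nil, List.sum_nil, add_zero]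
    have : L.getD k 0 = L[k] := by simp [List.getD, List.getElem?_eq_getElem h]
    rw [this, List.set_getElem_self]
  | cons x xs ih =>
    intro L h
    simp only [List.foldl_cons, List.map_cons, List.sum_cons]
    rw [ih _ (by simpa using h)]
    rw [List.set_set]
    have : (L.set k (L.getD k 0 + g x)).getD k 0 = L.getD k 0 + g x := by
      simp [List.getD, h]
    rw [this, add_assoc]

theorem pv_loop (g : Nat → Nat → Int) (m off : Nat) (L : List Int) :
    ∀ (k : Nat), off + k ≤ L.length →
    (List.range k).foldl (fun L i => (List.range m).foldl
        (fun L j => L.set (off+i) (L.getD (off+i) 0 + g i j)) L) L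
    = L.take off ++ (List.range k).map (fun i => L.getD (off+i) 0 + ((List.range m).map (g i)).sum)
        ++ L.drop (off+k) := by
  intro k
  induction k with
  | zero => intro h; simp
  | succ k ih =>
    intro h
    have hk : off + k < L.length := by omega
    have hoff : off ≤ L.length := by omega
    rw [List.range_succ, List.foldl_append, ih (by omega), List.foldl_cons, List.foldl_nil]
    have hpre : (L.take off ++ (List.range k).map
        (fun i => L.getD (off+i) 0 + ((List.range m).map (g i)).sum)).length = off + k := by
      simp [List.length_take]; omega
    rw [List.drop_eq_getElem_cons hk]
    set pre := L.take off ++ (List.range k).map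
        (fun i => L.getD (off+i) 0 + ((List.range m).map (g i)).sum) with hpredef
    rw [pv_addMany _ _ _ _ (by simp [List.length_append, hpre]; omega)]
    rw [pv_getD_mid pre _ _ _ hpre.symm, pv_set_mid pre _ _ _ _ hpre.symm]
    have hgetD : L.getD (off+k) 0 = L[off+k] := by
      simp [List.getD, List.getElem?_eq_getElem hk]
    simp [hpredef, List.map_append, List.append_assoc, Nat.add_assoc, List.getElem?_eq_getElem hk]

theorem pv_loop3 (g h : Nat → Int) (p q : Nat) (hpq : p ≠ q) (L : List Int)
    (hp : p < L.length) (hq : q < L.length) :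
    ∀ (k : Nat),
    (List.range k).foldl (fun L i =>
        (L.set p (L.getD p 0 + g i)).set q ((L.set p (L.getD p 0 + g i)).getD q 0 + h i)) L
    = (L.set p (L.getD p 0 + ((List.range k).map g).sum)).set q
        (L.getD q 0 + ((List.range k).map h).sum) := by
  intro k
  induction k with
  | zero =>
    simp only [List.range_zero, List.foldl_nil, List.map_nil, List.sum_nil, add_zero]
    have h1 : L.getD p 0 = L[p] := by simp [List.getD, List.getElem?_eq_getElem hp]
    have h2 : (L.set p L[p]).getD q 0 = L.getD q 0 := by
      rw [List.set_getElem_self]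
    rw [h1, List.set_getElem_self]
    have h3 : L.getD q 0 = L[q] := by simp [List.getD, List.getElem?_eq_getElem hq]
    rw [h3, List.set_getElem_self]
  | succ k ih =>
    rw [List.range_succ, List.foldl_append, ih, List.foldl_cons, List.foldl_nil]
    set A := L.getD p 0 + ((List.range k).map g).sum with hA
    set B := L.getD q 0 + ((List.range k).map h).sum with hB
    have e1 : ((L.set p A).set q B).getD p 0 = A := by
      rw [List.getD, List.getElem?_set_ne (Ne.symm hpq)]
      simp [hp]
    rw [e1]
    have e2 : ((L.set p A).set q B).set p (A + g k) = (L.set p (A + g k)).set q B := by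
      rw [List.set_comm _ _ (Ne.symm hpq), List.set_set]
    rw [e2]
    have e3 : ((L.set p (A + g k)).set q B).getD q 0 = B := by
      simp [List.getD, hq]
    rw [e3, List.set_set]
    simp [hA, hB, add_assoc]

theorem pv_map_getD_range (xs : List Int) :
    (List.range xs.length).map (fun j => xs.getD j 0) = xs := by
  apply List.ext_getElem
  · simp
  · intro i h1 h2
    simp [List.getD, List.getElem?_eq_getElem h2]

theorem pv_ofList_sublist {α : Type} [BEq α] (xs : List α) :
    (PySem.Set.ofList xs).Sublist xs := by
  induction xs using List.reverseRecOn with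
  | nil => simp [PySem.Set.ofList, PySem.Set.empty]
  | append_singleton xs x ih =>
    have h : PySem.Set.ofList (xs ++ [x]) = PySem.Set.add (PySem.Set.ofList xs) x := by
      simp [PySem.Set.ofList, List.foldl_append]
    rw [h, PySem.Set.add]
    split
    · exact ih.trans (List.sublist_append_left xs [x])
    · exact ih.append (List.Sublist.refl [x])

theorem pv_len_ofList_iff (xs : List Int) :
    (PySem.Set.ofList xs).length = xs.length ↔ xs.Nodup := by
  constructor
  · intro h
    have e := (pv_ofList_sublist xs).eq_of_length h
    rw [← e]
    exact PySem.Set.nodup_ofList xs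
  · intro h
    rw [PySem.Set.ofList_eq_self_of_nodup xs h]

theorem pv_allcheck (L : List Int) :
    ((PySem.List.pyRange 0 (L.length : Int) 1).all (fun i =>
      (PySem.List.pyRange (i + 1) (L.length : Int) 1).all (fun j =>
        !(PySem.List.pyGetD L i 0 == PySem.List.pyGetD L j 0)))) = decide L.Nodup := by
  rw [Bool.eq_iff_iff]
  simp only [List.all_eq_true, PySem.List.mem_pyRange_one, decide_eq_true_eq, Bool.not_eq_eq_eq_not,
    Bool.not_true, ne_eq, beq_eq_false_iff_ne]
  rw [List.Nodup, List.pairwise_iff_getElem]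
  constructor
  · intro H i j hi hj hij
    have h2 := H (i : Int) ⟨by positivity, by exact_mod_cast hi⟩ (j : Int)
      ⟨by exact_mod_cast hij, by exact_mod_cast hj⟩
    rw [PySem.List.pyGetD_eq_getElem L 0 (by positivity) (by exact_mod_cast hi),
        PySem.List.pyGetD_eq_getElem L 0 (by positivity) (by exact_mod_cast hj)] at h2
    simpa using h2
  · intro H i hi j hj
    have h0 : (0:Int) ≤ i := hi.1
    have h1 : i < (L.length : Int) := hi.2
    have h2 : i + 1 ≤ j := hj.1
    have h3 : j < (L.length : Int) := hj.2
    rw [PySem.List.pyGetD_eq_getElem L 0 (by omega) h1,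
        PySem.List.pyGetD_eq_getElem L 0 (by omega) h3]
    exact H i.toNat j.toNat (by omega) (by omega) (by omega)

theorem pv_getD_replicate (m i : Nat) : (List.replicate m (0:Int)).getD i 0 = 0 := by
  simp only [List.getD, List.getElem?_replicate]
  split <;> rfl

theorem pv_loop0 (g : Nat → Nat → Int) (m : Nat) (L : List Int) (k : Nat) (h : k ≤ L.length) :
    (List.range k).foldl (fun L i => (List.range m).foldl
        (fun L j => L.set i (L.getD i 0 + g i j)) L) L
    = (List.range k).map (fun i => L.getD i 0 + ((List.range m).map (g i)).sum) ++ L.drop k := by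
  have h2 := pv_loop g m 0 L k (by omega)
  simpa using h2

theorem pv_getD_shift (as bs : List Int) (nn : Nat) (h : as.length = nn) (i : Nat) :
    (as ++ bs).getD (nn + i) 0 = bs.getD i 0 := by
  subst h
  simp [List.getD, List.getElem?_append_right (by omega : as.length ≤ as.length + i)]

theorem pv_drop_shift (as bs : List Int) (nn : Nat) (h : as.length = nn) (i : Nat) :
    (as ++ bs).drop (nn + i) = bs.drop i := by
  subst h
  simp [List.drop_append]

theorem pv_take_exact (as bs : List Int) (nn : Nat) (h : as.length = nn) :
    (as ++ bs).take nn = as := by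
  subst h
  simp

theorem pv_getD_mid2 (pre : List Int) (x y : Int) (nn : Nat) (h : nn = pre.length) :
    (pre ++ [x, y]).getD (nn+1) 0 = y := by
  subst h
  simp [List.getD]

theorem pv_set_mid2 (pre : List Int) (x y v : Int) (nn : Nat) (h : nn = pre.length) :
    (pre ++ [x, y]).set (nn+1) v = pre ++ [x, v] := by
  subst h
  simp

theorem pv_main (square : List (List Int)) : is_heterosquare square = is_heterosquare_alt square := by
  unfold is_heterosquare is_heterosquare_alt
  by_cases hg : square.any (fun line => !((line.length : Int) == (square.length : Int))) = true
  · rw [if_pos hg, if_pos hg]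
  · rw [if_neg hg, if_neg hg]
    simp only [PySem.List.pyRange_zero_nat square.length, List.foldl_map, List.map_map,
      PySem.List.pySetD_natCast, PySem.List.pyGetD_natCast]
    simp only [← Nat.cast_ofNat (R := Int), ← Nat.cast_mul, ← Nat.cast_add, ← Nat.cast_add_one,
      PySem.List.pySetD_natCast, PySem.List.pyGetD_natCast]
    rw [pv_loop0 _ square.length _ square.length (by simp; omega)]
    have hrow : ∀ line ∈ square, line.length = square.length := by
      intro line hline
      have := List.any_eq_false.mp (Bool.not_eq_true _ ▸ hg) line hline
      simpa using this
    -- simplify the initial replicate and the three loop results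
    simp only [pv_getD_replicate, zero_add, List.drop_replicate]
    set R1 := List.map (fun i => (List.map (fun y => (square.getD i []).getD y 0)
      (List.range square.length)).sum) (List.range square.length) with hR1
    have hR1len : R1.length = square.length := by simp [hR1]
    rw [pv_loop _ square.length square.length _ square.length
      (by simp [hR1len]; omega)]
    simp only [pv_take_exact _ _ _ hR1len, pv_getD_shift _ _ _ hR1len,
      pv_drop_shift _ _ _ hR1len, pv_getD_replicate, zero_add, List.drop_replicate]
    have e2 : square.length * 2 + 2 - square.length - square.length = 2 := by omega
    simp only [e2, List.replicate_succ, List.replicate_zero]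
    set C1 := List.map (fun i => (List.map (fun y => (square.getD y []).getD i 0)
      (List.range square.length)).sum) (List.range square.length) with hC1
    have hC1len : C1.length = square.length := by simp [hC1]
    have h2n : (2 * square.length : Nat) = (R1 ++ C1).length := by
      simp [hR1len, hC1len]; omega
    rw [pv_loop3 _ _ (2 * square.length) (2 * square.length + 1) (by omega) _
      (by simp [hR1len, hC1len]; omega) (by simp [hR1len, hC1len]; omega) square.length]
    rw [pv_getD_mid (R1 ++ C1) 0 [0] (2 * square.length) h2n,
        pv_set_mid (R1 ++ C1) 0 [0] _ (2 * square.length) h2n]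
    rw [pv_getD_mid2 (R1 ++ C1) _ _ (2 * square.length) h2n,
        pv_set_mid2 (R1 ++ C1) _ _ _ (2 * square.length) h2n]
    simp only [zero_add]
    simp only [Function.comp_def, PySem.List.pyGetD_natCast]
    have hrows : R1 = List.map (fun row => row.sum) square := by
      rw [hR1]
      apply List.ext_getElem
      · simp
      · intro i h1 h2
        simp only [List.getElem_map, List.getElem_range]
        have hi : i < square.length := by simpa using h1
        have hsq : square.getD i [] = square[i] := by
          simp [List.getD, List.getElem?_eq_getElem hi]
        rw [hsq]
        have hlen : square[i].length = square.length := hrow _ (List.getElem_mem hi)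
        rw [show List.range square.length = List.range square[i].length by rw [hlen],
            pv_map_getD_range]
    rw [hrows, hC1]
    simp only [List.append_assoc, List.cons_append, List.nil_append]
    rw [pv_allcheck, decide_eq_decide]
    simp only [PySem.Set.len, Nat.cast_inj]
    exact (pv_len_ofList_iff _).symm

-- ===== VERDICT (by name: the statement is the Claim_ definition above) =====
theorem is_heterosquare_spec : Claim_equal_is_heterosquare := by
  intro square _
  exact pv_main square
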